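-- pv_equiv track=rewrite | github.com/rodolfocasan/scripts | Python/filtrado_selectivo_conjuntos.py | reconstruir_elemento_por_filtrado
-- ===== SOURCE A (Python) =====
-- def reconstruir_elemento_por_filtrado(subconjuntos, respuestas, limite_inferior):
--     """
--     Reconstruye el índice basado en las respuestas del usuario a los subconjuntos.
--
--     Argumentos:
--         subconjuntos (list): Los subconjuntos generados.
--         respuestas (list): Lista de booleanos indicando si el elemento está en cada subconjunto.
--         limite_inferior (int): El índice más pequeño del rango.
--
--     Returna:
--         int: El índice adivinado.
--     """
--     # Validar consistencia entre subconjuntos y respuestas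
--     if len(subconjuntos) != len(respuestas):
--         raise ValueError("El número de respuestas debe coincidir con el número de subconjuntos")
--
--     # Asegurar que el límite inferior sea entero
--     limite_inferior = int(limite_inferior)
--     valor_binario = 0  # acumulador para reconstruir posición relativa en el dominio
--
--     # Sumar potencias de 2 según respuestas afirmativas
--     for i, respuesta in enumerate(respuestas):
--         # Cada respuesta True indica que el bit i en la posición ajustada es 1
--         if respuesta:
--             valor_binario += (1 << i)  # agregar valor posicional 2^i
--
--     # Convertir posición relativa a índice real en el dominio original
--     indice_adivinado = limite_inferior + valor_binario
--     return indice_adivinado  # devolver índice reconstruido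
-- ===== SOURCE B (Python) =====
-- def reconstruir_elemento_por_filtrado(subconjuntos, respuestas, limite_inferior):
--     # Render the answers as a binary numeral string (MSB first) and let int(,2) parse it.
--     if len(subconjuntos) != len(respuestas):
--         raise ValueError("El número de respuestas debe coincidir con el número de subconjuntos")
--     bits = ''.join('1' if respuesta else '0' for respuesta in reversed(respuestas))
--     valor_binario = int(bits, 2) if bits else 0
--     return int(limite_inferior) + valor_binario
-- ===== Notes on version B (the rewrite author's own statement) =====
-- stated objective: alternative
-- what changed: Instead of an enumerate loop summing precomputed 1<<i weights, B stages the work through a different representation: it renders the answers as a binary numeral string (MSB first) and delegates the conversion to int(bits, 2).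
import Mathlib
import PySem

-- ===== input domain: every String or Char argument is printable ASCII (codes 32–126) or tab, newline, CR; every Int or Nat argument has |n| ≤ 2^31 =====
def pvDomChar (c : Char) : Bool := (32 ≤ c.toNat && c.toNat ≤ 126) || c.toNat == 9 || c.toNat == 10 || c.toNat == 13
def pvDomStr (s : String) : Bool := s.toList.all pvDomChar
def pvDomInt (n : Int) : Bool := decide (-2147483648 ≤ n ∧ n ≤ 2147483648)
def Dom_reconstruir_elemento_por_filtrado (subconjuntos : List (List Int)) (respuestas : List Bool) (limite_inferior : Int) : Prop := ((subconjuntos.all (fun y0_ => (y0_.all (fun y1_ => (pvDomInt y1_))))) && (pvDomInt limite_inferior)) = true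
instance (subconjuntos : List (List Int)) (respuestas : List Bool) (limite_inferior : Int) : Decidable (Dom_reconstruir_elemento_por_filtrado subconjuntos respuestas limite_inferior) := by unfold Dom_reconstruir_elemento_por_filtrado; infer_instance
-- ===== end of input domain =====

-- B renders the answers as a binary numeral string (MSB first) and parses it with int(,2), instead of A's enumerate loop summing 1<<i weights (alternative, same cost).

-- ===== PORT A =====
-- Port of A: enumerate loop adding 1 << i for each True answer, then limite_inferior + valor_binario.
def reconstruir_elemento_por_filtrado (subconjuntos : List (List Int)) (respuestas : List Bool) (limite_inferior : Int) : Int :=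
  let valor_binario : Int :=
    (PySem.List.enumerate respuestas).foldl
      (fun acc p => if p.2 then acc + ((1:Int) <<< p.1.toNat) else acc) 0
  limite_inferior + valor_binario

-- ===== PORT B =====
-- Port of B: build the binary numeral as a char list (MSB first), then int(bits, 2),
-- ported by hand as the standard base-2 numeral parse (exact here: bits holds only '0'/'1').
def reconstruir_elemento_por_filtrado_alt (subconjuntos : List (List Int)) (respuestas : List Bool) (limite_inferior : Int) : Int :=
  let bits : List Char := respuestas.reverse.map (fun respuesta => if respuesta then '1' else '0')
  let valor_binario : Int :=
    if bits = [] then 0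
    else bits.foldl (fun acc c => acc * 2 + ((c.toNat : Int) - 48)) 0
  limite_inferior + valor_binario

-- ===== PRECONDITION & SPEC =====
-- A raises ValueError when len(subconjuntos) != len(respuestas); exactly those inputs are excluded.
def Pre_reconstruir_elemento_por_filtrado (subconjuntos : List (List Int)) (respuestas : List Bool) (limite_inferior : Int) : Prop :=
  subconjuntos.length = respuestas.length
instance (subconjuntos : List (List Int)) (respuestas : List Bool) (limite_inferior : Int) : Decidable (Pre_reconstruir_elemento_por_filtrado subconjuntos respuestas limite_inferior) := by unfold Pre_reconstruir_elemento_por_filtrado; infer_instance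
def pvWitness_reconstruir_elemento_por_filtrado : List (List Int) × List Bool × Int := ([[1], [2]], [true, false], 5)

def Spec_reconstruir_elemento_por_filtrado (subconjuntos : List (List Int)) (respuestas : List Bool) (limite_inferior : Int) (out : Int) : Prop := out = reconstruir_elemento_por_filtrado_alt subconjuntos respuestas limite_inferior
instance (subconjuntos : List (List Int)) (respuestas : List Bool) (limite_inferior : Int) (out : Int) : Decidable (Spec_reconstruir_elemento_por_filtrado subconjuntos respuestas limite_inferior out) := by unfold Spec_reconstruir_elemento_por_filtrado; infer_instance

-- ===== CLAIM (what is proved, stated in full; the proofs are below) =====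
def Claim_equal_reconstruir_elemento_por_filtrado : Prop := ∀ (subconjuntos : List (List Int)) (respuestas : List Bool) (limite_inferior : Int), Dom_reconstruir_elemento_por_filtrado subconjuntos respuestas limite_inferior → Pre_reconstruir_elemento_por_filtrado subconjuntos respuestas limite_inferior → Spec_reconstruir_elemento_por_filtrado subconjuntos respuestas limite_inferior (reconstruir_elemento_por_filtrado subconjuntos respuestas limite_inferior)

-- ===== LEMMAS AND PROOFS =====
-- Reference value: LSB-first recursion on the bit list.
def pvBits : List Bool → Int
  | [] => 0
  | b :: t => (if b then 1 else 0) + 2 * pvBits t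

-- B's base-2 parse over the reversed digit list computes pvBits.
lemma parse_eq_pvBits (r : List Bool) (acc : Int) :
    (r.reverse.map (fun respuesta => if respuesta then '1' else '0')).foldl
        (fun acc c => acc * 2 + ((c.toNat : Int) - 48)) acc
      = acc * 2 ^ r.length + pvBits r := by
  induction r generalizing acc with
  | nil => simp [pvBits]
  | cons b t ih =>
      simp only [List.reverse_cons, List.map_append, List.foldl_append, List.map_cons,
        List.map_nil, List.foldl_cons, List.foldl_nil, ih, pvBits, List.length_cons]
      rcases b with _ | _ <;> simp <;> ring

-- A's enumerate loop computes pvBits (generalized over start index and accumulator).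
lemma enumA_eq_pvBits (r : List Bool) (k : Nat) (acc : Int) :
    (PySem.List.enumerate r (k : Int)).foldl
        (fun acc p => if p.2 then acc + ((1:Int) <<< p.1.toNat) else acc) acc
      = acc + 2 ^ k * pvBits r := by
  induction r generalizing k acc with
  | nil => simp [PySem.List.enumerate_nil, pvBits]
  | cons b t ih =>
      rw [PySem.List.enumerate_cons]
      have hk : ((k : Int) + 1) = ((k + 1 : Nat) : Int) := by push_cast; ring
      simp only [List.foldl_cons, hk, ih, pvBits]
      rcases b with _ | _ <;>
        simp [Int.shiftLeft_eq, pow_succ] <;> ring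

-- ===== VERDICT (by name: the statement is the Claim_ definition above) =====
theorem reconstruir_elemento_por_filtrado_spec : Claim_equal_reconstruir_elemento_por_filtrado := by
  intro s r l _ _
  unfold Spec_reconstruir_elemento_por_filtrado reconstruir_elemento_por_filtrado
    reconstruir_elemento_por_filtrado_alt
  cases r with
  | nil => simp [PySem.List.enumerate_nil]
  | cons b t =>
      have hA := enumA_eq_pvBits (b :: t) 0 0
      have hB := parse_eq_pvBits (b :: t) 0
      simp only [Nat.cast_zero] at hA
      simp only [List.reverse_cons, List.map_append, List.map_cons, List.map_nil] at hB ⊢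
      simp only [hA, hB]
      simp
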